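-- pv_equiv track=rewrite | github.com/MariosGkMeng/Straightforward-Obsidian2Latex | src/helper_functions.py | escape_underscore
-- ===== SOURCE A (Python) =====
-- def escape_underscore(text, ignore_brackets=False):
--     escaped = []
--     inside_special = False  # Track whether we're inside a special segment
--     inside_brackets = False  # Track whether we're inside [[ ]]
--     delimiter = None  # Store the current active delimiter
--
--     i = 0
--     while i < len(text):
--         char = text[i]
--
--         # Track [[ ]] sections
--         if text[i:i+2] == "[[":
--             inside_brackets = True
--         elif text[i:i+2] == "]]":
--             inside_brackets = False
--
--         # Toggle inside_special state when encountering special characters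
--         if char in {"$", "`"} and not inside_brackets:
--             if inside_special and char == delimiter:
--                 inside_special = False  # Closing the special segment
--                 delimiter = None
--             elif not inside_special:
--                 inside_special = True  # Opening a special segment
--                 delimiter = char
--
--         # Escape underscores only when NOT inside special characters or (unless ignore_brackets) brackets
--         if char == "_" and not inside_special and (ignore_brackets or not inside_brackets):
--             escaped.append(r"\_")
--         else:
--             escaped.append(char)
--
--         i += 1
--
--     return "".join(escaped)
-- ===== SOURCE B (Python) =====
-- def escape_underscore(text, ignore_brackets=False):
--     # Run-based scanner: jump between boundary chars ($ ` [ ]) with str-scans,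
--     # bulk-escaping each plain run via replace instead of per-char appends.
--     out = []
--     inside_special = False
--     inside_brackets = False
--     delimiter = None
--     boundaries = {'$', '`', '[', ']'}
--     i = 0
--     n = len(text)
--     while i < n:
--         j = i
--         while j < n and text[j] not in boundaries:
--             j += 1
--         chunk = text[i:j]
--         if not inside_special and (ignore_brackets or not inside_brackets):
--             chunk = chunk.replace('_', r'\_')
--         out.append(chunk)
--         if j < n:
--             c = text[j]
--             if c == '[' and text[j + 1:j + 2] == '[':
--                 inside_brackets = True
--             elif c == ']' and text[j + 1:j + 2] == ']':
--                 inside_brackets = False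
--             if c in ('$', '`') and not inside_brackets:
--                 if inside_special and c == delimiter:
--                     inside_special = False
--                     delimiter = None
--                 elif not inside_special:
--                     inside_special = True
--                     delimiter = c
--             out.append(c)
--             j += 1
--         i = j
--     return ''.join(out)
-- ===== Notes on version B (the rewrite author's own statement) =====
-- stated objective: faster
-- what changed: A walks the string one character at a time, re-testing the bracket/special state and appending per character; B is a run-based scanner that jumps to the next boundary character ($ ` [ ]), emits each boundary-free run in one piece (bulk str.replace when escaping is active), and only updates state at boundary characters, cutting the per-character Python interpreter overhead.
import Mathlib
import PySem

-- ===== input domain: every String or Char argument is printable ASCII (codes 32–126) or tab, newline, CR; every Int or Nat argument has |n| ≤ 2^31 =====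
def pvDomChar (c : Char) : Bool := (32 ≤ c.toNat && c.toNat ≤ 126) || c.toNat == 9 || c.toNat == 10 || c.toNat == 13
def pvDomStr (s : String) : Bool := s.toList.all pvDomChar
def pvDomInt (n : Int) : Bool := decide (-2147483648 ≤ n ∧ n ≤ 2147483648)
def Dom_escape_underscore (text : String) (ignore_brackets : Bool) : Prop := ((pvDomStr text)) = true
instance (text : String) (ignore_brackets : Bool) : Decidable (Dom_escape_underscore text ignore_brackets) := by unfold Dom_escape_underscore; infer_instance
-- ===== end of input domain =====

-- B rewrites A's per-character loop as a run-based scanner that emits boundary-free runs in one piece (objective: faster by a constant factor, measured).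

-- ===== PORT A =====
-- state-update helpers shared by neither port's *logic* — each port transcribes its own Python's updates inline

-- per-character loop of A: char + one-char lookahead (text[i:i+2] == "[[" ⟺ current '[' and next '[')
def pvGoA : List Char → Bool → Bool → Option Char → Bool → List Char
  | [], _, _, _, _ => []
  | c :: rest, insp, inbr, delim, ib =>
    let inbr' := if c = '[' ∧ rest.head? = some '[' then true
                 else if c = ']' ∧ rest.head? = some ']' then false
                 else inbr
    let st : Bool × Option Char :=
      if (c = '$' ∨ c = '`') ∧ inbr' = false then
        if insp = true ∧ delim = some c then (false, none)
        else if insp = false then (true, some c)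
        else (insp, delim)
      else (insp, delim)
    (if c = '_' ∧ st.1 = false ∧ (ib = true ∨ inbr' = false) then ['\\', '_'] else [c])
      ++ pvGoA rest st.1 inbr' st.2 ib

def escape_underscore (text : String) (ignore_brackets : Bool) : String :=
  String.mk (pvGoA text.toList false false none ignore_brackets)

-- ===== PORT B =====
def pvBoundary (c : Char) : Bool := c = '$' || c = '`' || c = '[' || c = ']'

-- run-based scanner of B: take the plain run, bulk-replace '_' in it, then handle one boundary char
def pvGoB (cs : List Char) (insp inbr : Bool) (delim : Option Char) (ib : Bool) : List Char :=
  let run := cs.takeWhile (fun c => !pvBoundary c)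
  let chunk := if insp = false ∧ (ib = true ∨ inbr = false)
               then PySem.Chars.replace run ['_'] ['\\', '_'] else run
  match h : cs.dropWhile (fun c => !pvBoundary c) with
  | [] => chunk
  | c :: rest' =>
    let inbr' := if c = '[' ∧ rest'.head? = some '[' then true
                 else if c = ']' ∧ rest'.head? = some ']' then false
                 else inbr
    let st : Bool × Option Char :=
      if (c = '$' ∨ c = '`') ∧ inbr' = false then
        if insp = true ∧ delim = some c then (false, none)
        else if insp = false then (true, some c)
        else (insp, delim)
      else (insp, delim)
    chunk ++ c :: pvGoB rest' st.1 inbr' st.2 ib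
termination_by cs.length
decreasing_by
  have : (cs.dropWhile (fun c => !pvBoundary c)).length ≤ cs.length :=
    (List.dropWhile_sublist _).length_le
  simp [h] at this; omega

def escape_underscore_alt (text : String) (ignore_brackets : Bool) : String :=
  String.mk (pvGoB text.toList false false none ignore_brackets)

-- ===== PRECONDITION & SPEC =====
def Spec_escape_underscore (text : String) (ignore_brackets : Bool) (out : String) : Prop := out = escape_underscore_alt text ignore_brackets
instance (text : String) (ignore_brackets : Bool) (out : String) : Decidable (Spec_escape_underscore text ignore_brackets out) := by unfold Spec_escape_underscore; infer_instance

-- ===== CLAIM (what is proved, stated in full; the proofs are below) =====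
def Claim_equal_escape_underscore : Prop := ∀ (text : String) (ignore_brackets : Bool), Dom_escape_underscore text ignore_brackets → Spec_escape_underscore text ignore_brackets (escape_underscore text ignore_brackets)

-- ===== LEMMAS AND PROOFS =====

-- str.replace with the single-char pattern '_' is exactly the per-char expansion
lemma replace_go_underscore (n : Nat) : ∀ (cs acc : List Char), cs.length ≤ n →
    PySem.Chars.replace.go ['_'] ['\\', '_'] n cs acc
      = acc.reverse ++ cs.flatMap (fun c => if c = '_' then ['\\', '_'] else [c]) := by
  induction n with
  | zero =>
    intro cs acc h
    have : cs = [] := List.eq_nil_of_length_eq_zero (Nat.le_zero.mp h)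
    subst this; unfold PySem.Chars.replace.go; simp
  | succ n ih =>
    intro cs acc h
    cases cs with
    | nil => unfold PySem.Chars.replace.go; simp
    | cons c t =>
      unfold PySem.Chars.replace.go
      by_cases hc : c = '_'
      · subst hc
        have hp : ['_'].isPrefixOf ('_' :: t) = true := by simp [List.isPrefixOf]
        rw [if_pos hp]
        simp only [List.length, List.drop_succ_cons, List.drop_zero]
        rw [ih t _ (by simpa using Nat.le_of_succ_le_succ h)]
        simp
      · have hp : ['_'].isPrefixOf (c :: t) = false := by
          simp [List.isPrefixOf]; exact fun h => hc h.symm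
        rw [if_neg (by simp [hp])]
        rw [ih t _ (by simpa using Nat.le_of_succ_le_succ h)]
        simp [hc]

lemma replace_underscore_eq_flatMap (cs : List Char) :
    PySem.Chars.replace cs ['_'] ['\\', '_']
      = cs.flatMap (fun c => if c = '_' then ['\\', '_'] else [c]) := by
  unfold PySem.Chars.replace
  rw [replace_go_underscore cs.length cs [] le_rfl]
  simp

-- A over a boundary-free run: each char leaves the state unchanged and emits the per-char expansion
lemma goA_run (run rest : List Char) (insp inbr : Bool) (delim : Option Char) (ib : Bool)
    (h : ∀ c ∈ run, pvBoundary c = false) :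
    pvGoA (run ++ rest) insp inbr delim ib
      = (if insp = false ∧ (ib = true ∨ inbr = false)
         then run.flatMap (fun c => if c = '_' then ['\\', '_'] else [c]) else run)
        ++ pvGoA rest insp inbr delim ib := by
  induction run with
  | nil => simp
  | cons c t ih =>
    have hc : pvBoundary c = false := h c (by simp)
    have ht : ∀ x ∈ t, pvBoundary x = false := fun x hx => h x (by simp [hx])
    have hnb : ¬(c = '$' ∨ c = '`') ∧ c ≠ '[' ∧ c ≠ ']' := by
      simp [pvBoundary] at hc; tauto
    show pvGoA (c :: (t ++ rest)) insp inbr delim ib = _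
    rw [pvGoA]
    rw [show (if c = '[' ∧ (t ++ rest).head? = some '[' then true
              else if c = ']' ∧ (t ++ rest).head? = some ']' then false else inbr) = inbr from by
          rw [if_neg (fun hx => hnb.2.1 hx.1), if_neg (fun hx => hnb.2.2 hx.1)]]
    rw [show (if (c = '$' ∨ c = '`') ∧ inbr = false then
                if insp = true ∧ delim = some c then ((false : Bool), (none : Option Char))
                else if insp = false then (true, some c) else (insp, delim)
              else (insp, delim)) = (insp, delim) from if_neg (fun hx => hnb.1 hx.1)]
    simp only
    rw [ih ht]
    by_cases hcond : insp = false ∧ (ib = true ∨ inbr = false)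
    · rw [if_pos hcond, if_pos hcond]
      by_cases hu : c = '_'
      · rw [if_pos ⟨hu, hcond⟩]; simp [hu]
      · rw [if_neg (by tauto)]; simp [hu]
    · rw [if_neg hcond, if_neg hcond, if_neg (by tauto)]
      simp

lemma dropWhile_cons_false {p : Char → Bool} :
    ∀ (l : List Char) (c : Char) (r : List Char), l.dropWhile p = c :: r → p c = false := by
  intro l
  induction l with
  | nil => simp [List.dropWhile]
  | cons a t ih =>
    intro c r h
    by_cases hp : p a
    · rw [List.dropWhile_cons_of_pos hp] at h; exact ih _ _ h
    · rw [List.dropWhile_cons_of_neg hp] at h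
      cases h; simpa using hp

lemma goA_eq_goB (n : Nat) : ∀ (cs : List Char), cs.length ≤ n →
    ∀ (insp inbr : Bool) (delim : Option Char) (ib : Bool),
    pvGoA cs insp inbr delim ib = pvGoB cs insp inbr delim ib := by
  induction n with
  | zero =>
    intro cs h insp inbr delim ib
    have : cs = [] := List.eq_nil_of_length_eq_zero (Nat.le_zero.mp h)
    subst this
    rw [pvGoB.eq_def]
    simp [pvGoA, replace_underscore_eq_flatMap]
  | succ n ih =>
    intro cs h insp inbr delim ib
    have hmem : ∀ c ∈ cs.takeWhile (fun c => !pvBoundary c), pvBoundary c = false :=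
      fun c hc => by simpa using List.mem_takeWhile_imp hc
    rcases hrest : cs.dropWhile (fun c => !pvBoundary c) with _ | ⟨c, rest'⟩
    · conv_rhs => rw [pvGoB.eq_def]
      simp only [hrest]
      conv_lhs => rw [← List.takeWhile_append_dropWhile (p := fun c => !pvBoundary c) (l := cs)]
      rw [hrest, goA_run _ _ _ _ _ _ hmem]
      simp [pvGoA, replace_underscore_eq_flatMap]
    · have hb : pvBoundary c = true := by
        have := dropWhile_cons_false _ _ _ hrest
        simpa using this
      have hlen : rest'.length ≤ n := by
        have h1 : (cs.dropWhile (fun c => !pvBoundary c)).length ≤ cs.length :=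
          (List.dropWhile_sublist _).length_le
        rw [hrest] at h1; simp at h1; omega
      have hc_ne : ¬(c = '_') := by
        rintro rfl; exact absurd hb (by decide)
      conv_rhs => rw [pvGoB.eq_def]
      conv_lhs => rw [← List.takeWhile_append_dropWhile (p := fun c => !pvBoundary c) (l := cs)]
      rw [hrest, goA_run _ _ _ _ _ _ hmem, pvGoA]
      rw [ih rest' hlen]
      simp [hc_ne, replace_underscore_eq_flatMap]

-- ===== VERDICT (by name: the statement is the Claim_ definition above) =====
theorem escape_underscore_spec : Claim_equal_escape_underscore := by
  intro text ib _
  unfold Spec_escape_underscore escape_underscore escape_underscore_alt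
  rw [goA_eq_goB text.toList.length _ le_rfl]
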